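-- pv_equiv track=rewrite | github.com/classic-theo/Reading_Profiler | app.py | analyze_genre_bias
-- ===== SOURCE A (Python) =====
-- def analyze_genre_bias(questions, answers):
--     genre_scores, genre_counts = {}, {}
--     for i, q in enumerate(questions):
--         genre = q.get('genre', 'etc')
--         genre_counts[genre] = genre_counts.get(genre, 0) + 1
--         if i < len(answers) and answers[i] == q.get('answer'):
--             genre_scores[genre] = genre_scores.get(genre, 0) + 1
--     bias_result = {}
--     for genre, count in genre_counts.items():
--         bias_result[genre] = round((genre_scores.get(genre, 0) / count) * 100)
--     return bias_result
-- ===== SOURCE B (Python) =====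
-- def analyze_genre_bias(questions, answers):
--     # Pre-tag every question with (genre, was-it-answered-correctly), then
--     # group by rescanning: one pass collects the distinct genres in first-seen
--     # order, and each genre's percentage is computed by counting over the
--     # tagged list (generator sums), with no counter dicts at all.
--     keyed = [(q.get('genre', 'etc'),
--               i < len(answers) and answers[i] == q.get('answer'))
--              for i, q in enumerate(questions)]
--     genres = []
--     for g, _ in keyed:
--         if g not in genres:
--             genres.append(g)
--     return {g: round(sum(1 for h, ok in keyed if h == g and ok)
--                      / sum(1 for h, _ in keyed if h == g) * 100)
--             for g in genres}
-- ===== Notes on version B (the rewrite author's own statement) =====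
-- stated objective: alternative
-- what changed: B keeps no counters at all: it tags each question once with (genre, correct?) in a staged pass, collects distinct genres in first-seen order, then computes each genre's percentage by rescanning the tagged list with generator-sum counts (group-by-rescan, O(g*n)) instead of A's single pass accumulating two parallel counter dicts.
import Mathlib
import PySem

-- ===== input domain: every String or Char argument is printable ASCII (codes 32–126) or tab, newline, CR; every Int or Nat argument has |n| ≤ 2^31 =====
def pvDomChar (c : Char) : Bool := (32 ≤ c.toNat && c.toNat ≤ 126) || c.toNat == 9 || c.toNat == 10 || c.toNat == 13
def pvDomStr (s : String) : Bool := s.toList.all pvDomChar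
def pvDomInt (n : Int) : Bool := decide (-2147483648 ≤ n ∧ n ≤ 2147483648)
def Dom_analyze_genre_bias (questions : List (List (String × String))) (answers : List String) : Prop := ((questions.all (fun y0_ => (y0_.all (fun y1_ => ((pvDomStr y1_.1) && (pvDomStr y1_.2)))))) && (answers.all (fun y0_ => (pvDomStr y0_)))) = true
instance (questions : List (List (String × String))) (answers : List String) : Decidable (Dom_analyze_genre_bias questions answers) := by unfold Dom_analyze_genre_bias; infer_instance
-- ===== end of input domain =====

-- B replaces A's single pass over two parallel counter dicts by group-by-rescan: tag each
-- question once with (genre, correct?), collect distinct genres, then count per genre by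
-- rescanning the tagged list (alternative decomposition, no counters maintained).

-- ===== PORT A =====
-- Shared hand-written model of Python's `round((s/c)*100)` (PySem has no float primitive):
-- exact IEEE-754 double semantics — s/c rounded to nearest double (ties to even on the
-- 53-bit significand), that double multiplied by 100 and rounded to a double again, then
-- `round` = round-half-to-even to an integer.  Exact for 0 ≤ s, 0 < c (checked against CPython).
def pvRoundHalfEven (a b : Nat) : Nat :=
  let q := a / b
  let r := a % b
  if 2 * r < b then q else if b < 2 * r then q + 1 else if q % 2 = 0 then q else q + 1

-- e with 2^e ≤ p/q < 2^(e+1)  (p, q > 0)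
def pvFloorLog2 (p q : Nat) : Int :=
  let e0 : Int := (Nat.log2 p : Int) - (Nat.log2 q : Int)
  if p * 2 ^ (-e0).toNat < q * 2 ^ e0.toNat then e0 - 1 else e0

-- nearest IEEE double to p/q as (m, e): value m * 2^e, m the rounded 53-bit significand
def pvToDouble (p q : Nat) : Nat × Int :=
  if p = 0 then (0, 0)
  else
    let e := pvFloorLog2 p q
    (pvRoundHalfEven (p * 2 ^ (52 - e).toNat) (q * 2 ^ (e - 52).toNat), e - 52)

-- Python round((s/c)*100) for ints 0 ≤ s, 0 < c
def pvRoundPct (s c : Int) : Int :=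
  let d1 := pvToDouble s.toNat c.toNat
  let d2 := pvToDouble (d1.1 * 100 * 2 ^ d1.2.toNat) (2 ^ (-d1.2).toNat)
  if 0 ≤ d2.2 then (d2.1 * 2 ^ d2.2.toNat : Nat) else (pvRoundHalfEven d2.1 (2 ^ (-d2.2).toNat) : Nat)

def analyze_genre_bias (questions : List (List (String × String))) (answers : List String) : List (String × Int) :=
  let st := (PySem.List.enumerate questions).foldl
    (fun (st : PySem.Dict String Int × PySem.Dict String Int) iq =>
      let genre := (PySem.Dict.mk iq.2).getD "genre" "etc"
      let genre_counts := st.2.insert genre (st.2.getD genre 0 + 1)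
      let genre_scores :=
        if decide (iq.1 < PySem.List.len answers) &&
            (PySem.List.pyGet? answers iq.1 == (PySem.Dict.mk iq.2).get? "answer") then
          st.1.insert genre (st.1.getD genre 0 + 1)
        else st.1
      (genre_scores, genre_counts))
    (PySem.Dict.empty, PySem.Dict.empty)
  let bias_result := st.2.items.foldl
    (fun (bias : PySem.Dict String Int) gc =>
      bias.insert gc.1 (pvRoundPct (st.1.getD gc.1 0) gc.2))
    PySem.Dict.empty
  bias_result.items

-- ===== PORT B =====
def analyze_genre_bias_alt (questions : List (List (String × String))) (answers : List String) : List (String × Int) :=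
  let keyed := (PySem.List.enumerate questions).map (fun iq =>
    ((PySem.Dict.mk iq.2).getD "genre" "etc",
     decide (iq.1 < PySem.List.len answers) &&
       (PySem.List.pyGet? answers iq.1 == (PySem.Dict.mk iq.2).get? "answer")))
  let genres := keyed.foldl
    (fun (gs : List String) p => if gs.contains p.1 then gs else gs ++ [p.1]) []
  genres.map (fun g =>
    (g, pvRoundPct
      (keyed.foldl (fun (n : Int) p => if p.1 == g && p.2 then n + 1 else n) 0)
      (keyed.foldl (fun (n : Int) p => if p.1 == g then n + 1 else n) 0)))

-- ===== PRECONDITION & SPEC =====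
def Spec_analyze_genre_bias (questions : List (List (String × String))) (answers : List String) (out : List (String × Int)) : Prop := out = analyze_genre_bias_alt questions answers
instance (questions : List (List (String × String))) (answers : List String) (out : List (String × Int)) : Decidable (Spec_analyze_genre_bias questions answers out) := by unfold Spec_analyze_genre_bias; infer_instance

-- ===== CLAIM (what is proved, stated in full; the proofs are below) =====
def Claim_equal_analyze_genre_bias : Prop := ∀ (questions : List (List (String × String))) (answers : List String), Dom_analyze_genre_bias questions answers → Spec_analyze_genre_bias questions answers (analyze_genre_bias questions answers)

-- ===== LEMMAS AND PROOFS =====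

-- the genre key and the correctness flag of one enumerated question (proof-only abbreviations)
def pvKey (iq : Int × List (String × String)) : String := (PySem.Dict.mk iq.2).getD "genre" "etc"

def pvOk (answers : List String) (iq : Int × List (String × String)) : Bool :=
  decide (iq.1 < PySem.List.len answers) &&
    (PySem.List.pyGet? answers iq.1 == (PySem.Dict.mk iq.2).get? "answer")

-- A's first loop: the two dicts, characterised
theorem pv_counts_getD (l : List (Int × List (String × String))) (g : String) :
    (l.foldl (fun (d : PySem.Dict String Int) iq =>
        d.insert (pvKey iq) (d.getD (pvKey iq) 0 + 1)) PySem.Dict.empty).getD g 0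
      = ((l.map pvKey).count g : Int) := by
  rw [← List.foldl_map (f := pvKey) (g := fun (d : PySem.Dict String Int) x => d.insert x (d.getD x 0 + 1))]
  rw [PySem.Dict.getD_foldl_insert_add_one]
  simp

theorem pv_scores_getD (answers : List String) (l : List (Int × List (String × String))) (g : String) :
    (l.foldl (fun (d : PySem.Dict String Int) iq =>
        if pvOk answers iq then d.insert (pvKey iq) (d.getD (pvKey iq) 0 + 1) else d)
        PySem.Dict.empty).getD g 0
      = (((l.filter (pvOk answers)).map pvKey).count g : Int) := by
  rw [PySem.List.foldl_if_eq_foldl_filter]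
  exact pv_counts_getD (l.filter (pvOk answers)) g

-- B's genre-collection loop is Set.ofList of the genre keys
theorem pv_genres_eq (l : List (String × Bool)) :
    (l.foldl (fun (gs : List String) p => if gs.contains p.1 then gs else gs ++ [p.1]) [])
      = PySem.Set.ofList (l.map Prod.fst) := by
  rw [PySem.Set.ofList_eq_foldl, List.foldl_map]
  rfl

-- B's two rescans counted, against A's counter values
theorem pv_cnt_all (answers : List String) (l : List (Int × List (String × String))) (g : String) :
    ((l.map (fun iq => (pvKey iq, pvOk answers iq))).countP (fun p => p.1 == g) : Int)
      = ((l.map pvKey).count g : Int) := by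
  simp [List.count, List.countP_map, Function.comp_def]

theorem pv_cnt_true (answers : List String) (l : List (Int × List (String × String))) (g : String) :
    ((l.map (fun iq => (pvKey iq, pvOk answers iq))).countP (fun p => p.1 == g && p.2) : Int)
      = (((l.filter (pvOk answers)).map pvKey).count g : Int) := by
  simp only [List.count, List.countP_map, List.countP_filter, Function.comp_def]

-- ===== VERDICT =====
theorem analyze_genre_bias_spec : Claim_equal_analyze_genre_bias := by
  intro questions answers _
  unfold Spec_analyze_genre_bias analyze_genre_bias analyze_genre_bias_alt
  have hk : ∀ iq : Int × List (String × String),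
      (PySem.Dict.mk iq.2).getD "genre" "etc" = pvKey iq := fun _ => rfl
  have ho : ∀ iq : Int × List (String × String),
      (decide (iq.1 < PySem.List.len answers) &&
        (PySem.List.pyGet? answers iq.1 == (PySem.Dict.mk iq.2).get? "answer")) = pvOk answers iq :=
    fun _ => rfl
  simp only [hk, ho]
  rw [PySem.List.foldl_prod_mk
    (f := fun (d : PySem.Dict String Int) iq =>
      if pvOk answers iq then d.insert (pvKey iq) (d.getD (pvKey iq) 0 + 1) else d)
    (g := fun (d : PySem.Dict String Int) iq =>
      d.insert (pvKey iq) (d.getD (pvKey iq) 0 + 1))]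
  set E := PySem.List.enumerate questions with hE
  have hkeysC : (E.foldl (fun (d : PySem.Dict String Int) iq =>
      d.insert (pvKey iq) (d.getD (pvKey iq) 0 + 1)) PySem.Dict.empty).keys
      = PySem.Set.ofList (E.map pvKey) := by
    rw [PySem.Dict.keys_foldl_insert_key E pvKey (fun d iq => d.getD (pvKey iq) 0 + 1),
      PySem.Dict.keys_empty, PySem.Set.update_nil_left]
  dsimp only
  rw [PySem.Dict.items_foldl_insert_fresh
      (l := (E.foldl (fun (d : PySem.Dict String Int) iq =>
        d.insert (pvKey iq) (d.getD (pvKey iq) 0 + 1)) PySem.Dict.empty).items)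
      (k := fun (gc : String × Int) => gc.1)
      (v := fun (gc : String × Int) => pvRoundPct ((E.foldl (fun (d : PySem.Dict String Int) iq =>
        if pvOk answers iq then d.insert (pvKey iq) (d.getD (pvKey iq) 0 + 1) else d)
        PySem.Dict.empty).getD gc.1 0) gc.2)
      (d := PySem.Dict.empty)
      (fun a _ => PySem.Dict.contains_empty a.1)
      (by show ((E.foldl (fun (d : PySem.Dict String Int) iq =>
            d.insert (pvKey iq) (d.getD (pvKey iq) 0 + 1)) PySem.Dict.empty).keys).Nodup
          rw [hkeysC]; exact PySem.Set.nodup_ofList _)]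
  rw [PySem.Dict.items_eq_map_keys
        (E.foldl (fun (d : PySem.Dict String Int) iq =>
          d.insert (pvKey iq) (d.getD (pvKey iq) 0 + 1)) PySem.Dict.empty)
        (by rw [hkeysC]; exact PySem.Set.nodup_ofList _) (0 : Int),
      hkeysC, pv_genres_eq]
  simp only [List.map_map, List.foldl_map,
    show (PySem.Dict.empty : PySem.Dict String Int).items = [] from rfl, List.nil_append]
  apply List.map_congr_left
  intro g _
  simp only [Function.comp_def]
  rw [pv_scores_getD, pv_counts_getD]
  have h1 := PySem.List.foldl_count_if
    (fun iq : Int × List (String × String) => pvKey iq == g && pvOk answers iq) E 0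
  have h2 := PySem.List.foldl_count_if
    (fun iq : Int × List (String × String) => pvKey iq == g) E 0
  simp only [zero_add] at h1 h2
  rw [h1, h2]
  have := pv_cnt_true answers E g
  simp only [List.countP_map, Function.comp_def] at this
  rw [← this]
  have := pv_cnt_all answers E g
  simp only [List.countP_map, Function.comp_def] at this
  rw [← this]
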